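-- pv_equiv track=rewrite | github.com/helenawsu/ZeroWaste-VehicleRouting | data_parser/grid_extract_debug.py | _line_centers_from_positions
-- ===== SOURCE A (Python) =====
-- def _line_centers_from_positions(
--     positions: list[int],
--     gap: int = 5,
-- ) -> list[int]:
--     if not positions:
--         return []
--     positions = sorted(set(positions))
--     clusters = []
--     cluster = [positions[0]]
--     for i in range(1, len(positions)):
--         if positions[i] - positions[i - 1] <= gap:
--             cluster.append(positions[i])
--         else:
--             clusters.append((min(cluster), max(cluster)))
--             cluster = [positions[i]]
--     if cluster:
--         clusters.append((min(cluster), max(cluster)))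
--     return [(c[0] + c[1]) // 2 for c in clusters]
-- ===== SOURCE B (Python) =====
-- def _line_centers_from_positions(
--     positions: list[int],
--     gap: int = 5,
-- ) -> list[int]:
--     if not positions:
--         return []
--     ps = sorted(set(positions))
--     n = len(ps)
--     cuts = [i for i in range(1, n) if ps[i] - ps[i - 1] > gap]
--     bounds = [0] + cuts + [n]
--     return [(ps[s] + ps[e - 1]) // 2 for s, e in zip(bounds, bounds[1:])]
-- ===== Notes on version B (the rewrite author's own statement) =====
-- stated objective: alternative
-- what changed: Instead of accumulating explicit cluster lists of elements and (min,max) tuples in one stateful loop, B first collects the cut indices where the gap is exceeded, forms segment bounds [0]+cuts+[n], and then emits (ps[s]+ps[e-1])//2 per consecutive bound pair, using sortedness so first/last replace min/max.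
import Mathlib
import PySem

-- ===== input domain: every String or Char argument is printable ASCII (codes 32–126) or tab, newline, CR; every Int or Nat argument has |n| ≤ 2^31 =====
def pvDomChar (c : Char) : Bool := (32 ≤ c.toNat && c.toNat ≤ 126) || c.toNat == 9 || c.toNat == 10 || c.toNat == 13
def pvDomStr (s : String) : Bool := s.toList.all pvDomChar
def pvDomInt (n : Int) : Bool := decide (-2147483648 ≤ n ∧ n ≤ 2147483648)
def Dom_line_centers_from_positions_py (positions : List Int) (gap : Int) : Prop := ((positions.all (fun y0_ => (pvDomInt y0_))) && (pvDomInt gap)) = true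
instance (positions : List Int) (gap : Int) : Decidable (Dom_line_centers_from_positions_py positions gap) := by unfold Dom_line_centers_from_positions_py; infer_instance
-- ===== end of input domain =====

-- B replaces A's single stateful loop over element-lists and (min,max) tuples by a cut-index pass
-- followed by a segment-bounds pass (first/last of each sorted segment replace min/max); objective: alternative.

-- ===== PORT A =====
-- `cluster` is nonempty whenever Python takes min/max of it, so `.getD 0` on min?/max? is exact.
def line_centers_from_positions_py (positions : List Int) (gap : Int) : List Int :=
  if positions = [] then []
  else
    let ps := PySem.List.sorted (PySem.Set.ofList positions) (fun x => x) false
    let st := (PySem.List.pyRange 1 (PySem.List.len ps) 1).foldl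
      (fun (st : List (Int × Int) × List Int) i =>
        if PySem.List.pyGetD ps i 0 - PySem.List.pyGetD ps (i - 1) 0 ≤ gap then
          (st.1, st.2 ++ [PySem.List.pyGetD ps i 0])
        else
          (st.1 ++ [((PySem.List.min? st.2 (fun x => x)).getD 0,
                     (PySem.List.max? st.2 (fun x => x)).getD 0)],
           [PySem.List.pyGetD ps i 0]))
      ([], [PySem.List.pyGetD ps 0 0])
    let clusters :=
      if st.2 ≠ [] then
        st.1 ++ [((PySem.List.min? st.2 (fun x => x)).getD 0,
                  (PySem.List.max? st.2 (fun x => x)).getD 0)]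
      else st.1
    clusters.map (fun c => PySem.Int.floordiv (c.1 + c.2) 2)

-- ===== PORT B =====
def line_centers_from_positions_py_alt (positions : List Int) (gap : Int) : List Int :=
  if positions = [] then []
  else
    let ps := PySem.List.sorted (PySem.Set.ofList positions) (fun x => x) false
    let n := PySem.List.len ps
    let cuts := (PySem.List.pyRange 1 n 1).filter
      (fun i => decide (PySem.List.pyGetD ps i 0 - PySem.List.pyGetD ps (i - 1) 0 > gap))
    let bounds := 0 :: (cuts ++ [n])
    (bounds.zip bounds.tail).map
      (fun se => PySem.Int.floordiv (PySem.List.pyGetD ps se.1 0 + PySem.List.pyGetD ps (se.2 - 1) 0) 2)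

-- ===== PRECONDITION & SPEC =====
def Spec_line_centers_from_positions_py (positions : List Int) (gap : Int) (out : List Int) : Prop := out = line_centers_from_positions_py_alt positions gap
instance (positions : List Int) (gap : Int) (out : List Int) : Decidable (Spec_line_centers_from_positions_py positions gap out) := by unfold Spec_line_centers_from_positions_py; infer_instance

-- ===== CLAIM (what is proved, stated in full; the proofs are below) =====
def Claim_equal_line_centers_from_positions_py : Prop := ∀ (positions : List Int) (gap : Int), Dom_line_centers_from_positions_py positions gap → Spec_line_centers_from_positions_py positions gap (line_centers_from_positions_py positions gap)

-- ===== LEMMAS AND PROOFS =====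

-- midpoints of the segments of ps delimited by start s, cut list cs and end e
def pvMids (ps : List Int) (s : Int) : List Int → Int → List Int
  | [], e => [PySem.Int.floordiv (PySem.List.pyGetD ps s 0 + PySem.List.pyGetD ps (e - 1) 0) 2]
  | c :: cs, e => PySem.Int.floordiv (PySem.List.pyGetD ps s 0 + PySem.List.pyGetD ps (c - 1) 0) 2
      :: pvMids ps c cs e

-- B's zip-over-bounds comprehension computes exactly pvMids
lemma pvZipMids (ps : List Int) (cs : List Int) (s e : Int) :
    (((s :: (cs ++ [e])).zip (cs ++ [e])).map
      (fun se => PySem.Int.floordiv (PySem.List.pyGetD ps se.1 0 + PySem.List.pyGetD ps (se.2 - 1) 0) 2))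
    = pvMids ps s cs e := by
  induction cs generalizing s with
  | nil => simp [pvMids]
  | cons c cs ih =>
      simp only [List.cons_append, List.zip_cons_cons, List.map_cons, pvMids]
      exact congrArg _ (ih c)

-- the contiguous segment ps[s:e] read through pyGetD
def pvSeg (ps : List Int) (s e : Int) : List Int :=
  (PySem.List.pyRange s e 1).map (fun j => PySem.List.pyGetD ps j 0)

-- A's loop step and loop state after processing range(1, m), and the cut indices among 1..m-1
def pvStep (ps : List Int) (gap : Int) (st : List (Int × Int) × List Int) (i : Int) :
    List (Int × Int) × List Int :=
  if PySem.List.pyGetD ps i 0 - PySem.List.pyGetD ps (i - 1) 0 ≤ gap then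
    (st.1, st.2 ++ [PySem.List.pyGetD ps i 0])
  else
    (st.1 ++ [((PySem.List.min? st.2 (fun x => x)).getD 0,
               (PySem.List.max? st.2 (fun x => x)).getD 0)],
     [PySem.List.pyGetD ps i 0])

def pvState (ps : List Int) (gap : Int) (m : Nat) : List (Int × Int) × List Int :=
  (PySem.List.pyRange 1 (m : Int) 1).foldl (pvStep ps gap) ([], [PySem.List.pyGetD ps 0 0])

def pvCuts (ps : List Int) (gap : Int) (m : Nat) : List Int :=
  (PySem.List.pyRange 1 (m : Int) 1).filter
    (fun i => decide (PySem.List.pyGetD ps i 0 - PySem.List.pyGetD ps (i - 1) 0 > gap))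

def pvMid (c : Int × Int) : Int := PySem.Int.floordiv (c.1 + c.2) 2

lemma pvGetD_mono (ps : List Int) (hps : ps.Pairwise (· ≤ ·)) (i j : Int)
    (h0 : 0 ≤ i) (hij : i ≤ j) (hj : j < ps.length) :
    PySem.List.pyGetD ps i 0 ≤ PySem.List.pyGetD ps j 0 := by
  rw [PySem.List.pyGetD_eq_getElem ps 0 h0 (by omega),
      PySem.List.pyGetD_eq_getElem ps 0 (by omega) hj]
  rcases eq_or_lt_of_le hij with h | h
  · simp [h]
  · exact List.pairwise_iff_getElem.mp hps i.toNat j.toNat (by omega) (by omega) (by omega)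

lemma pvSeg_min (ps : List Int) (hps : ps.Pairwise (· ≤ ·)) (s e : Int)
    (h0 : 0 ≤ s) (hse : s < e) (he : e ≤ ps.length) :
    (PySem.List.min? (pvSeg ps s e) (fun x => x)).getD 0 = PySem.List.pyGetD ps s 0 := by
  unfold pvSeg
  rw [PySem.List.pyRange_one_cons hse, List.map_cons, PySem.List.min?_id_cons, Option.getD_some]
  have h1 := PySem.List.foldl_min_le
    ((PySem.List.pyRange (s + 1) e 1).map (fun j => PySem.List.pyGetD ps j 0))
    (PySem.List.pyGetD ps s 0)
  rcases PySem.List.foldl_min_mem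
    ((PySem.List.pyRange (s + 1) e 1).map (fun j => PySem.List.pyGetD ps j 0))
    (PySem.List.pyGetD ps s 0) with h2 | h2
  · exact h2
  · obtain ⟨j, hj, hje⟩ := List.mem_map.mp h2
    obtain ⟨hj1, hj2⟩ := PySem.List.mem_pyRange_one.mp hj
    rw [← hje]
    exact le_antisymm (hje ▸ h1.1) (pvGetD_mono ps hps s j h0 (by omega) (by omega))

lemma pvSeg_max (ps : List Int) (hps : ps.Pairwise (· ≤ ·)) (s e : Int)
    (h0 : 0 ≤ s) (hse : s < e) (he : e ≤ ps.length) :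
    (PySem.List.max? (pvSeg ps s e) (fun x => x)).getD 0 = PySem.List.pyGetD ps (e - 1) 0 := by
  unfold pvSeg
  rw [PySem.List.pyRange_one_cons hse, List.map_cons, PySem.List.max?_id_cons, Option.getD_some]
  have h1 := PySem.List.le_foldl_max
    ((PySem.List.pyRange (s + 1) e 1).map (fun j => PySem.List.pyGetD ps j 0))
    (PySem.List.pyGetD ps s 0)
  -- upper bound: the running max is some ps[j], s ≤ j < e, hence ≤ ps[e-1]
  have hub : List.foldl max (PySem.List.pyGetD ps s 0)
      ((PySem.List.pyRange (s + 1) e 1).map (fun j => PySem.List.pyGetD ps j 0))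
      ≤ PySem.List.pyGetD ps (e - 1) 0 := by
    rcases PySem.List.foldl_max_mem
      ((PySem.List.pyRange (s + 1) e 1).map (fun j => PySem.List.pyGetD ps j 0))
      (PySem.List.pyGetD ps s 0) with h2 | h2
    · rw [h2]; exact pvGetD_mono ps hps s (e - 1) h0 (by omega) (by omega)
    · obtain ⟨j, hj, hje⟩ := List.mem_map.mp h2
      obtain ⟨hj1, hj2⟩ := PySem.List.mem_pyRange_one.mp hj
      rw [← hje]
      exact pvGetD_mono ps hps j (e - 1) (by omega) (by omega) (by omega)
  -- lower bound: ps[e-1] occurs in the cluster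
  have hlb : PySem.List.pyGetD ps (e - 1) 0
      ≤ List.foldl max (PySem.List.pyGetD ps s 0)
        ((PySem.List.pyRange (s + 1) e 1).map (fun j => PySem.List.pyGetD ps j 0)) := by
    rcases eq_or_lt_of_le (by omega : s ≤ e - 1) with h | h
    · rw [← h]; exact h1.1
    · exact h1.2 _ (List.mem_map.mpr ⟨e - 1, PySem.List.mem_pyRange_one.mpr ⟨by omega, by omega⟩, rfl⟩)
  exact le_antisymm hub hlb

lemma pvLoopInv (ps : List Int) (gap : Int) (hps : ps.Pairwise (· ≤ ·)) :
    ∀ m : Nat, 1 ≤ m → m ≤ ps.length →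
    ∃ s : Int, 0 ≤ s ∧ s < m ∧ (pvState ps gap m).2 = pvSeg ps s m ∧
      ∀ cs e, (pvState ps gap m).1.map pvMid ++ pvMids ps s cs e
        = pvMids ps 0 (pvCuts ps gap m ++ cs) e := by
  intro m hm1
  induction m, hm1 using Nat.le_induction with
  | base =>
      intro _
      have h1 : pvState ps gap 1 = ([], [PySem.List.pyGetD ps 0 0]) := by
        unfold pvState
        rw [show PySem.List.pyRange 1 ((1 : Nat) : Int) 1 = [] from by decide, List.foldl_nil]
      have h2 : pvCuts ps gap 1 = [] := by
        unfold pvCuts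
        rw [show PySem.List.pyRange 1 ((1 : Nat) : Int) 1 = [] from by decide, List.filter_nil]
      refine ⟨0, le_refl 0, by norm_num, ?_, ?_⟩
      · rw [h1]
        unfold pvSeg
        rw [show PySem.List.pyRange 0 ((1 : Nat) : Int) 1 = [0] from by decide, List.map_cons,
          List.map_nil]
      · intro cs e
        rw [h1, h2, List.map_nil, List.nil_append, List.nil_append]
  | succ m hm ih =>
      intro hlen
      obtain ⟨s, hs0, hsm, hseg, hcont⟩ := ih (by omega)
      have hcast : ((m + 1 : Nat) : Int) = (m : Int) + 1 := by push_cast; ring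
      have hrange : PySem.List.pyRange 1 ((m + 1 : Nat) : Int) 1
          = PySem.List.pyRange 1 (m : Int) 1 ++ [(m : Int)] := by
        rw [hcast, PySem.List.pyRange_one_succ_right (by exact_mod_cast hm)]
      have hstate : pvState ps gap (m + 1) = pvStep ps gap (pvState ps gap m) (m : Int) := by
        unfold pvState
        rw [hrange, List.foldl_append, List.foldl_cons, List.foldl_nil]
      by_cases hc : PySem.List.pyGetD ps (m : Int) 0 - PySem.List.pyGetD ps ((m : Int) - 1) 0 ≤ gap
      · -- same cluster continues
        have hcuts : pvCuts ps gap (m + 1) = pvCuts ps gap m := by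
          unfold pvCuts
          rw [hrange, List.filter_append,
            List.filter_cons_of_neg (by simp only [decide_eq_true_eq, not_lt]; exact hc),
            List.filter_nil, List.append_nil]
        refine ⟨s, hs0, by push_cast; omega, ?_, ?_⟩
        · rw [hstate]
          unfold pvStep
          rw [if_pos hc, hseg]
          unfold pvSeg
          rw [hcast, PySem.List.pyRange_one_succ_right (by exact_mod_cast hsm.le), List.map_append,
            List.map_cons, List.map_nil]
        · intro cs e
          rw [hstate]
          unfold pvStep
          rw [if_pos hc, hcuts]
          exact hcont cs e
      · -- gap exceeded: cluster closed at m
        have hm' : (1 : Int) ≤ (m : Int) := by exact_mod_cast hm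
        have hcuts : pvCuts ps gap (m + 1) = pvCuts ps gap m ++ [(m : Int)] := by
          unfold pvCuts
          rw [hrange, List.filter_append,
            List.filter_cons_of_pos (by simp only [decide_eq_true_eq]; exact lt_of_not_ge hc),
            List.filter_nil]
        refine ⟨(m : Int), by omega, by push_cast; omega, ?_, ?_⟩
        · rw [hstate]
          unfold pvStep
          rw [if_neg hc]
          unfold pvSeg
          rw [hcast, PySem.List.pyRange_one_singleton, List.map_cons, List.map_nil]
        · intro cs e
          rw [hstate]
          unfold pvStep
          rw [if_neg hc, hcuts, List.append_assoc]
          have hmin := pvSeg_min ps hps s (m : Int) hs0 hsm (by exact_mod_cast (by omega : m ≤ ps.length))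
          have hmax := pvSeg_max ps hps s (m : Int) hs0 hsm (by exact_mod_cast (by omega : m ≤ ps.length))
          rw [← hseg] at hmin hmax
          have : ((pvState ps gap m).1 ++
              [((PySem.List.min? (pvState ps gap m).2 (fun x => x)).getD 0,
                (PySem.List.max? (pvState ps gap m).2 (fun x => x)).getD 0)]).map pvMid
              ++ pvMids ps (m : Int) cs e
              = (pvState ps gap m).1.map pvMid ++ pvMids ps s ((m : Int) :: cs) e := by
            rw [List.map_append, List.map_cons, List.map_nil, List.append_assoc]
            congr 1
            rw [hmin, hmax]
            rfl
          rw [this, hcont ((m : Int) :: cs) e, List.singleton_append]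

-- ===== VERDICT (by name: the statement is the Claim_ definition above) =====
theorem line_centers_from_positions_py_spec : Claim_equal_line_centers_from_positions_py := by
  intro positions gap _
  unfold Spec_line_centers_from_positions_py line_centers_from_positions_py
    line_centers_from_positions_py_alt
  by_cases hpos : positions = []
  · rw [if_pos hpos, if_pos hpos]
  · rw [if_neg hpos, if_neg hpos]
    set ps := PySem.List.sorted (PySem.Set.ofList positions) (fun x => x) false with hpsdef
    have hps : ps.Pairwise (· ≤ ·) := PySem.List.sorted_pairwise _ _
    have hne : ps ≠ [] := by
      rw [hpsdef, Ne, PySem.List.sorted_eq_nil_iff]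
      intro h
      obtain ⟨x, hx⟩ := List.exists_mem_of_ne_nil positions hpos
      have hmem := (PySem.Set.mem_ofList positions x).mpr hx
      rw [h] at hmem
      exact absurd hmem (List.not_mem_nil)
    have hlen : 1 ≤ ps.length := List.length_pos_of_ne_nil hne
    obtain ⟨s, hs0, hsm, hseg, hcont⟩ := pvLoopInv ps gap hps ps.length hlen (le_refl _)
    show (let st := pvState ps gap ps.length
          let clusters := if st.2 ≠ [] then
              st.1 ++ [((PySem.List.min? st.2 (fun x => x)).getD 0,
                        (PySem.List.max? st.2 (fun x => x)).getD 0)]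
            else st.1
          clusters.map pvMid)
        = (((0 : Int) :: (pvCuts ps gap ps.length ++ [(ps.length : Int)])).zip
            (pvCuts ps gap ps.length ++ [(ps.length : Int)])).map
            (fun se => PySem.Int.floordiv
              (PySem.List.pyGetD ps se.1 0 + PySem.List.pyGetD ps (se.2 - 1) 0) 2)
    have hne2 : (pvState ps gap ps.length).2 ≠ [] := by
      rw [hseg]
      unfold pvSeg
      rw [PySem.List.pyRange_one_cons (by exact_mod_cast hsm), List.map_cons]
      exact List.cons_ne_nil _ _
    have hmin := pvSeg_min ps hps s (ps.length : Int) hs0 hsm (le_refl _)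
    have hmax := pvSeg_max ps hps s (ps.length : Int) hs0 hsm (le_refl _)
    rw [← hseg] at hmin hmax
    simp only [if_pos hne2]
    rw [pvZipMids ps (pvCuts ps gap ps.length) 0 (ps.length : Int),
      List.map_append, List.map_cons, List.map_nil, hmin, hmax]
    have hlast : [pvMid (PySem.List.pyGetD ps s 0, PySem.List.pyGetD ps ((ps.length : Int) - 1) 0)]
        = pvMids ps s [] (ps.length : Int) := rfl
    rw [hlast, hcont [] (ps.length : Int), List.append_nil]
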